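-- pv_equiv track=rewrite | github.com/Byongho96/algorithm_practice | Baekjoon/13422_도둑.py | calculate_the_max
-- ===== SOURCE A (Python) =====
-- def calculate_the_max(N, M, K, money):
--     # Edge case
--     if N == M:
--         return 1 if sum(money) < K else 0
--
--     # Double the list for considering a cylce
--     money += money
--
--     # Run two pointer
--     s, e = 0, M - 1
--     cases = 0
--     stolen = sum(money[:M])
--     for _ in range(N):
--         # Satisfied
--         if stolen < K:
--             cases += 1
--
--         # Move the pointer
--         stolen -= money[s]
--         s += 1
--         e += 1
--         stolen += money[e]
--
--     return cases
-- ===== SOURCE B (Python) =====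
-- def calculate_the_max(N, M, K, money):
--     # Edge case
--     if N == M:
--         return 1 if sum(money) < K else 0
--
--     # Double the list for considering a cycle (same in-place mutation as A)
--     money += money
--
--     # Prefix-sum table over the doubled list
--     pre = [0]
--     acc = 0
--     for x in money:
--         acc += x
--         pre.append(acc)
--
--     # Count windows by table lookup
--     cases = 0
--     for i in range(N):
--         if pre[i + M] - pre[i] < K:
--             cases += 1
--     return cases
-- ===== Notes on version B (the rewrite author's own statement) =====
-- stated objective: alternative
-- what changed: Replaces the two-pointer incrementally-maintained sliding window sum with a prefix-sum table built in one pass over the doubled list, so each window is counted by a pure table lookup pre[i+M]-pre[i] instead of mutating s/e/stolen state.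
-- outside the precondition, e.g. on calculate_the_max(1, -1, 10, [5]): A returns 1, B returns 0
import Mathlib
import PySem

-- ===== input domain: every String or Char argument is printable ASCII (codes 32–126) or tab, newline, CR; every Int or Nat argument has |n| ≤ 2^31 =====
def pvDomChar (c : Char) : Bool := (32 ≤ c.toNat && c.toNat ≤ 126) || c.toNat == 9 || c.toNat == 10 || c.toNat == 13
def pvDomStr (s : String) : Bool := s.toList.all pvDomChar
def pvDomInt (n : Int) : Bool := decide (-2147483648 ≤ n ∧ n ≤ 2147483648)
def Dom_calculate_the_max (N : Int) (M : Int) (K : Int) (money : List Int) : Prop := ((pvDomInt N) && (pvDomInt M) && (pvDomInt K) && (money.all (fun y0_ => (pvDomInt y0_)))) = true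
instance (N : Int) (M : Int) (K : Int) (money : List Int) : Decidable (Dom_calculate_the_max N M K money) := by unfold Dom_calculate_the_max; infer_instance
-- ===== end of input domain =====

-- B replaces the two-pointer incrementally maintained window sum with a prefix-sum table
-- over the doubled list and counts windows by table lookup (objective: alternative).
-- Note: A mutates `money` in place (money += money); the equivalence proved here is about
-- the RETURN value only (B performs the same mutation in Python).

-- ===== PORT A =====
-- out-of-range indices (excluded by Pre_) surface as the pyGetD default; inside Pre_ every
-- index is in range, so pyGetD is exact.
def calculate_the_max (N : Int) (M : Int) (K : Int) (money : List Int) : Int :=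
  if N = M then (if money.sum < K then 1 else 0)
  else
    let money2 := money ++ money
    let init : Int × Int × Int × Int := (0, M - 1, 0, (PySem.List.slice money2 none (some M)).sum)
    let res := (List.range N.toNat).foldl (fun (st : Int × Int × Int × Int) _ =>
      let s := st.1; let e := st.2.1; let cases := st.2.2.1; let stolen := st.2.2.2
      let cases := if stolen < K then cases + 1 else cases
      let stolen := stolen - PySem.List.pyGetD money2 s 0
      let s := s + 1
      let e := e + 1
      let stolen := stolen + PySem.List.pyGetD money2 e 0
      (s, e, cases, stolen)) init
    res.2.2.1

-- ===== PORT B =====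
def calculate_the_max_alt (N : Int) (M : Int) (K : Int) (money : List Int) : Int :=
  if N = M then (if money.sum < K then 1 else 0)
  else
    let money2 := money ++ money
    let pa := money2.foldl (fun (p : List Int × Int) x =>
        let acc := p.2 + x
        (p.1 ++ [acc], acc)) ([0], 0)
    let pre := pa.1
    (PySem.List.pyRange 0 N 1).foldl (fun cases i =>
      if PySem.List.pyGetD pre (i + M) 0 - PySem.List.pyGetD pre i 0 < K then cases + 1 else cases) 0

-- ===== PRECONDITION & SPEC =====
-- Pre_ excludes inputs where A's indexing leaves [0, 2*len(money)): a negative M makes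
-- money[s]/money[e] wrap around Python-style (an artefact of negative indexing A never
-- intends), and N + M > 2*len(money) with 0 < N makes A raise IndexError.
def Pre_calculate_the_max (N : Int) (M : Int) (K : Int) (money : List Int) : Prop :=
  N = M ∨ N ≤ 0 ∨ (0 ≤ M ∧ N + M ≤ 2 * (money.length : Int))
instance (N : Int) (M : Int) (K : Int) (money : List Int) : Decidable (Pre_calculate_the_max N M K money) := by unfold Pre_calculate_the_max; infer_instance
def pvWitness_calculate_the_max : Int × Int × Int × List Int := (4, 2, 5, [1, 2, 3, 4])
def Spec_calculate_the_max (N : Int) (M : Int) (K : Int) (money : List Int) (out : Int) : Prop := out = calculate_the_max_alt N M K money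
instance (N : Int) (M : Int) (K : Int) (money : List Int) (out : Int) : Decidable (Spec_calculate_the_max N M K money out) := by unfold Spec_calculate_the_max; infer_instance

-- ===== CLAIM (what is proved, stated in full; the proofs are below) =====
def Claim_equal_calculate_the_max : Prop := ∀ (N : Int) (M : Int) (K : Int) (money : List Int), Dom_calculate_the_max N M K money → Pre_calculate_the_max N M K money → Spec_calculate_the_max N M K money (calculate_the_max N M K money)

-- ===== LEMMAS AND PROOFS =====

-- prefix sums of the first t elements
def pvT (L : List Int) (t : Nat) : Int := (L.take t).sum

theorem pvT_succ (L : List Int) (t : Nat) (h : t < L.length) :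
    pvT L (t + 1) = pvT L t + L[t] := by
  simp [pvT, List.sum_take_succ L t h]

-- B's prefix pass characterised
theorem pvPre_char (L : List Int) : ∀ (p : List Int) (a : Int),
    L.foldl (fun (q : List Int × Int) x => (q.1 ++ [q.2 + x], q.2 + x)) (p, a)
      = (p ++ (List.range L.length).map (fun i => a + (L.take (i + 1)).sum), a + L.sum) := by
  induction L with
  | nil => intro p a; simp
  | cons x L ih =>
      intro p a
      simp only [List.foldl_cons, ih (p ++ [a + x]) (a + x),
        List.length_cons, List.range_succ_eq_map (n := L.length), List.map_cons, List.map_map]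
      simp only [Prod.mk.injEq]
      refine ⟨?_, by simp [List.sum_cons]; ring⟩
      simp only [List.append_assoc, List.singleton_append]
      congr 2
      · simp [List.take]
      · apply List.map_congr_left; intro i _
        simp [List.take_succ_cons, List.sum_cons, Function.comp]; ring

theorem pvPre_getD (L : List Int) (k : Nat) (hk : k ≤ L.length) :
    ([0] ++ (List.range L.length).map (fun i => 0 + (L.take (i + 1)).sum)).getD k 0 = pvT L k := by
  cases k with
  | zero => simp [pvT]
  | succ t =>
      have ht : t < L.length := by omega
      simp [List.getD, pvT, ht]

-- A's loop invariant (stated on the zeta-reduced step function): after folding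
-- `range k` from the window-j state, the cases component counts the windows
-- j, …, j+k-1 whose sum is below K.
theorem pvLoopA (L : List Int) (M K : Int) (hM : 0 ≤ M) :
    ∀ (k j : Nat) (c : Int), j + k + M.toNat ≤ L.length →
    ((List.range k).foldl (fun (st : Int × Int × Int × Int) (_ : Nat) =>
        (st.1 + 1, st.2.1 + 1, if st.2.2.2 < K then st.2.2.1 + 1 else st.2.2.1,
          st.2.2.2 - PySem.List.pyGetD L st.1 0 + PySem.List.pyGetD L (st.2.1 + 1) 0))
      ((j : Int), M - 1 + (j : Int), c, pvT L (j + M.toNat) - pvT L j)).2.2.1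
    = (List.range k).foldl (fun cc i =>
        if pvT L ((j + i) + M.toNat) - pvT L (j + i) < K then cc + 1 else cc) c := by
  intro k
  induction k with
  | zero => intro j c _; simp
  | succ k ih =>
      intro j c h
      rw [List.range_succ_eq_map (n := k)]
      simp only [List.foldl_cons, List.foldl_map]
      have hj : j < L.length := by omega
      have hjm : j + M.toNat < L.length := by omega
      have hgs : PySem.List.pyGetD L ((j : Int)) 0 = L[j] := by
        rw [PySem.List.pyGetD_natCast]; simp [List.getD, hj]
      have hge : PySem.List.pyGetD L (M - 1 + (j : Int) + 1) 0 = L[j + M.toNat] := by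
        have hc : M - 1 + (j : Int) + 1 = ((j + M.toNat : Nat) : Int) := by push_cast; omega
        rw [hc, PySem.List.pyGetD_natCast]; simp [List.getD, hjm]
      have hstep :
          (pvT L (j + M.toNat) - pvT L j) - PySem.List.pyGetD L ((j : Int)) 0
            + PySem.List.pyGetD L (M - 1 + (j : Int) + 1) 0
          = pvT L ((j + 1) + M.toNat) - pvT L (j + 1) := by
        rw [hgs, hge]
        have h1 := pvT_succ L j hj
        have h2 := pvT_succ L (j + M.toNat) hjm
        have hc : (j + 1) + M.toNat = (j + M.toNat) + 1 := by omega
        rw [hc, h1, h2]; ring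
      have hState :
          (((j : Int)) + 1, M - 1 + (j : Int) + 1,
            (if pvT L (j + M.toNat) - pvT L j < K then c + 1 else c),
            (pvT L (j + M.toNat) - pvT L j) - PySem.List.pyGetD L ((j : Int)) 0
              + PySem.List.pyGetD L (M - 1 + (j : Int) + 1) 0)
          = (((j + 1 : Nat) : Int), M - 1 + ((j + 1 : Nat) : Int),
              (if pvT L (j + M.toNat) - pvT L j < K then c + 1 else c),
              pvT L ((j + 1) + M.toNat) - pvT L (j + 1)) := by
        rw [hstep]
        simp
        omega
      rw [hState, ih (j + 1) _ (by omega)]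
      have hfun : (fun (cc : Int) (i : Nat) =>
            if pvT L ((j + 1 + i) + M.toNat) - pvT L (j + 1 + i) < K then cc + 1 else cc)
          = (fun (cc : Int) (i : Nat) =>
            if pvT L ((j + i.succ) + M.toNat) - pvT L (j + i.succ) < K then cc + 1 else cc) := by
        funext cc i
        have hc : j + 1 + i = j + i.succ := by omega
        rw [hc]
      rw [hfun]
      norm_num

theorem pvT_zero (L : List Int) : pvT L 0 = 0 := rfl

-- ===== VERDICT (by name: the statement is the Claim_ definition above) =====
theorem calculate_the_max_spec : Claim_equal_calculate_the_max := by
  intro N M K money _ hpre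
  unfold Spec_calculate_the_max calculate_the_max calculate_the_max_alt
  by_cases hNM : N = M
  · simp [hNM]
  · simp only [hNM, if_false]
    by_cases hN0 : N ≤ 0
    · have hN : N.toNat = 0 := by omega
      have hR : PySem.List.pyRange 0 N 1 = [] := PySem.List.pyRange_one_eq_nil (by omega)
      simp [hN, hR]
    · rcases hpre with h | h | h
      · exact absurd h hNM
      · exact absurd h hN0
      obtain ⟨hM, hNM2⟩ := h
      set L := money ++ money with hL
      have hlen : L.length = 2 * money.length := by
        rw [hL, List.length_append]; omega
      have hbound : 0 + N.toNat + M.toNat ≤ L.length := by omega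
      have hpre2 := pvPre_char L [0] 0
      simp only [PySem.List.slice_to L hM, hpre2, PySem.List.pyRange_one, List.foldl_map,
        Int.sub_zero]
      have hT : (List.take M.toNat L).sum = pvT L M.toNat := rfl
      rw [hT]
      have hA := pvLoopA L M K hM N.toNat 0 0 hbound
      simp only [Nat.cast_zero, add_zero, Nat.zero_add, pvT_zero, sub_zero] at hA
      rw [hA]
      refine PySem.List.foldl_congr_mem _ _ _ _ ?_
      intro cc i hi
      have hiN : i < N.toNat := List.mem_range.mp hi
      have hc1 : (0 : Int) + (i : Int) + M = ((i + M.toNat : Nat) : Int) := by push_cast; omega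
      have hc2 : (0 : Int) + (i : Int) = ((i : Nat) : Int) := by ring
      rw [hc1, hc2, PySem.List.pyGetD_natCast, PySem.List.pyGetD_natCast,
        pvPre_getD L (i + M.toNat) (by omega), pvPre_getD L i (by omega)]
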